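-- pv_equiv track=rewrite | github.com/mohankaran-03/ai-sports | exercise_engine.py | count_pushups
-- ===== SOURCE A (Python) =====
-- def count_pushups(elbow_angles):
--     counter = 0
--     stage = None
--     for angle in elbow_angles:
--         if angle < 90:
--             stage = "down"
--         if angle > 160 and stage == "down":
--             stage = "up"
--             counter += 1
--     return counter
-- ===== SOURCE B (Python) =====
-- from itertools import groupby
--
--
-- def count_pushups(elbow_angles):
--     def label(a):
--         return "down" if a < 90 else ("up" if a > 160 else None)
--
--     labels = [k for k, _ in groupby(l for l in map(label, elbow_angles) if l is not None)]
--     return sum(1 for prev, cur in zip(labels, labels[1:]) if prev == "down" and cur == "up")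
-- ===== Notes on version B (the rewrite author's own statement) =====
-- stated objective: alternative
-- what changed: Replaces the counter+stage state machine with a declarative pipeline: map angles to down/up labels, drop neutrals, collapse runs with itertools.groupby, and count down->up transitions in the collapsed label list.
import Mathlib
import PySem

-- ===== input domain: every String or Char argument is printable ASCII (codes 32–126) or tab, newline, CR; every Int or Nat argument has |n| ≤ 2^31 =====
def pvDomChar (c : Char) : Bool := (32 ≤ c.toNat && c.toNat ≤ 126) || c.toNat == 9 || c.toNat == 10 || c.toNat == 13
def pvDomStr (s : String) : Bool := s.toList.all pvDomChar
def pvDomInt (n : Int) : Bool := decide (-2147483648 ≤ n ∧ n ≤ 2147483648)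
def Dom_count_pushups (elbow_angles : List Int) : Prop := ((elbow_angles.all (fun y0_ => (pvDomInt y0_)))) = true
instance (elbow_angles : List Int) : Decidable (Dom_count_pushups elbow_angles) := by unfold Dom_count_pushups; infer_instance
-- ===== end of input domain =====

-- B is an alternative decomposition (label / collapse runs / count transitions), not faster; equal return value on all inputs.

-- ===== PORT A =====
-- loop body of A: first 'if' may set stage to "down", second 'if' counts and sets "up"
def astep (st : Int × Option String) (angle : Int) : Int × Option String :=
  let st := if angle < 90 then (st.1, some "down") else st
  if angle > 160 ∧ st.2 = some "down" then (st.1 + 1, some "up") else st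

def count_pushups (elbow_angles : List Int) : Int :=
  (elbow_angles.foldl astep (0, none)).1

-- ===== PORT B =====
-- Source B's label(a): "down" ↦ some false, "up" ↦ some true, None ↦ none
def labelOf (a : Int) : Option Bool :=
  if a < 90 then some false else if a > 160 then some true else none

-- itertools.groupby keys: collapse runs of equal consecutive labels
def collapse : List Bool → List Bool
  | [] => []
  | [a] => [a]
  | a :: b :: rest => if a = b then collapse (b :: rest) else a :: collapse (b :: rest)

def count_pushups_alt (elbow_angles : List Int) : Int :=
  let labels := collapse (elbow_angles.filterMap labelOf)
  (((labels.zip labels.tail).filter fun p => !p.1 && p.2).length : Int)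

-- ===== PRECONDITION & SPEC =====
def Spec_count_pushups (elbow_angles : List Int) (out : Int) : Prop := out = count_pushups_alt elbow_angles
instance (elbow_angles : List Int) (out : Int) : Decidable (Spec_count_pushups elbow_angles out) := by unfold Spec_count_pushups; infer_instance

-- ===== CLAIM (what is proved, stated in full; the proofs are below) =====
def Claim_equal_count_pushups : Prop := ∀ (elbow_angles : List Int), Dom_count_pushups elbow_angles → Spec_count_pushups elbow_angles (count_pushups elbow_angles)

-- ===== LEMMAS AND PROOFS =====

-- abstract state machine over labels (stage: none / some false = "down" / some true = "up")
def mstep (st : Int × Option Bool) (l : Bool) : Int × Option Bool :=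
  match l with
  | false => (st.1, some false)
  | true => if st.2 = some false then (st.1 + 1, some true) else st

def encode : Option Bool → Option String
  | none => none
  | some false => some "down"
  | some true => some "up"

-- A's fold is the label machine run over the filtered labels
theorem foldA (xs : List Int) : ∀ (c : Int) (s : Option Bool),
    xs.foldl astep (c, encode s)
      = (fun p : Int × Option Bool => (p.1, encode p.2)) ((xs.filterMap labelOf).foldl mstep (c, s)) := by
  induction xs with
  | nil => intro c s; rfl
  | cons a xs ih =>
    intro c s
    by_cases h1 : a < 90
    · have hl : labelOf a = some false := by simp [labelOf, h1]
      have hs : astep (c, encode s) a = (c, encode (some false)) := by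
        simp [astep, h1, encode]; omega
      simp only [List.foldl_cons, List.filterMap_cons, hl, hs]
      exact ih c (some false)
    · by_cases h2 : a > 160
      · have hl : labelOf a = some true := by simp [labelOf, h1, h2]
        have hs : astep (c, encode s) a
            = (fun p : Int × Option Bool => (p.1, encode p.2)) (mstep (c, s) true) := by
          cases s with
          | none => simp [astep, h1, h2, encode, mstep]
          | some b => cases b <;> simp [astep, h1, h2, encode, mstep]
        simp only [List.foldl_cons, List.filterMap_cons, hl, hs]
        cases hms : mstep (c, s) true with
        | mk c' s' => exact ih c' s'
      · have hl : labelOf a = none := by simp [labelOf, h1, h2]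
        have hs : astep (c, encode s) a = (c, encode s) := by
          simp [astep, h1, h2]
        simp only [List.foldl_cons, List.filterMap_cons, hl, hs]
        exact ih c s

theorem mstep_idem (st : Int × Option Bool) (b : Bool) :
    mstep (mstep st b) b = mstep st b := by
  cases b
  · rfl
  · simp only [mstep]; split <;> simp

-- collapsing duplicate runs does not change the machine run
theorem collapse_fold (l : List Bool) : ∀ st,
    (collapse l).foldl mstep st = l.foldl mstep st := by
  induction l using collapse.induct with
  | case1 => intro st; rfl
  | case2 a => intro st; rfl
  | case3 b rest ih =>
    intro st
    simp only [collapse, if_true]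
    rw [ih st]
    simp only [List.foldl_cons]
    rw [mstep_idem]
  | case4 a b rest hab ih =>
    intro st
    simp only [collapse, if_neg hab, List.foldl_cons]
    exact ih (mstep st a)

theorem collapse_head (a : Bool) (rest : List Bool) :
    ∃ t, collapse (a :: rest) = a :: t := by
  induction rest generalizing a with
  | nil => exact ⟨[], rfl⟩
  | cons b r ih =>
    by_cases h : a = b
    · subst h
      obtain ⟨t, ht⟩ := ih a
      exact ⟨t, by rw [show collapse (a :: a :: r) = collapse (a :: r) from by simp [collapse], ht]⟩
    · exact ⟨collapse (b :: r), by simp [collapse, h]⟩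

theorem collapse_chain (l : List Bool) : (collapse l).IsChain (· ≠ ·) := by
  induction l using collapse.induct with
  | case1 => simp [collapse]
  | case2 a => simp [collapse]
  | case3 b rest ih => simpa [collapse] using ih
  | case4 a b rest hab ih =>
    obtain ⟨t, ht⟩ := collapse_head b rest
    simp only [collapse, if_neg hab, ht]
    exact List.isChain_cons_cons.mpr ⟨hab, ht ▸ ih⟩

-- B's transition count as a function
def pairCount (L : List Bool) : Int :=
  (((L.zip L.tail).filter fun p => !p.1 && p.2).length : Int)

theorem pairCount_nil : pairCount [] = 0 := rfl
theorem pairCount_single (a : Bool) : pairCount [a] = 0 := rfl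
theorem pairCount_cons (a b : Bool) (r : List Bool) :
    pairCount (a :: b :: r) = (if a = false ∧ b = true then 1 else 0) + pairCount (b :: r) := by
  cases a <;> cases b <;> simp [pairCount] <;> omega

theorem pairCount_true_cons (r : List Bool) : pairCount (true :: r) = pairCount r := by
  cases r with
  | nil => rfl
  | cons b r' => rw [pairCount_cons]; simp

-- run from a "previous label" state counts the adjacent down→up pairs
theorem runP (L : List Bool) : ∀ (prev : Bool) (c : Int),
    (prev :: L).IsChain (· ≠ ·) →
    (L.foldl mstep (c, some prev)).1 = c + pairCount (prev :: L) := by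
  induction L with
  | nil => intro prev c _; simp [pairCount_single]
  | cons a rest ih =>
    intro prev c hch
    have hne : prev ≠ a := (List.isChain_cons_cons.mp hch).1
    have hch' : (a :: rest).IsChain (· ≠ ·) := (List.isChain_cons_cons.mp hch).2
    rw [pairCount_cons]
    cases a with
    | false =>
      have hm : mstep (c, some prev) false = (c, some false) := rfl
      simp only [List.foldl_cons, hm]
      rw [ih false c hch']
      cases prev <;> simp_all
    | true =>
      have hprev : prev = false := by cases prev <;> simp_all
      subst hprev
      have hm : mstep (c, some false) true = (c + 1, some true) := rfl
      simp only [List.foldl_cons, hm]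
      rw [ih true (c + 1) hch']
      simp
      ring

theorem runQ (L : List Bool) : ∀ (c : Int), L.IsChain (· ≠ ·) →
    (L.foldl mstep (c, none)).1 = c + pairCount L := by
  induction L with
  | nil => intro c _; simp [pairCount_nil]
  | cons a rest ih =>
    intro c hch
    cases a with
    | false =>
      have hm : mstep (c, (none : Option Bool)) false = (c, some false) := rfl
      simp only [List.foldl_cons, hm]
      exact runP rest false c hch
    | true =>
      have hm : mstep (c, (none : Option Bool)) true = (c, none) := rfl
      simp only [List.foldl_cons, hm]
      rw [pairCount_true_cons]
      exact ih c ((List.isChain_cons.mp hch).2)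

-- ===== VERDICT (by name: the statement is the Claim_ definition above) =====
theorem count_pushups_spec : Claim_equal_count_pushups := by
  intro xs _
  unfold Spec_count_pushups count_pushups count_pushups_alt
  have h1 := foldA xs 0 none
  have h2 : (xs.foldl astep (0, none)).1 = ((xs.filterMap labelOf).foldl mstep (0, none)).1 := by
    rw [show ((none : Option String)) = encode none from rfl, h1]
  rw [h2, ← collapse_fold (xs.filterMap labelOf) (0, none),
      runQ _ 0 (collapse_chain _)]
  simp [pairCount]
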